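-- pv_equiv track=rewrite | github.com/blackfox20092006/phanmemquanlyvb | Library/library.py | fSort
-- ===== SOURCE A (Python) =====
-- def fSort(list_file):
--     list_file = list(list_file)
--     no_tag = []
--     other = []
--     value = []
--     for i in list_file:
--         if len(i.split('__')) == 1:
--             no_tag += [i]
--         else:
--             other += [i]
--     return list(no_tag+other)
-- ===== SOURCE B (Python) =====
-- def fSort(list_file):
--     return sorted(list_file, key=lambda i: len(i.split('__')) > 1)
-- ===== Notes on version B (the rewrite author's own statement) =====
-- stated objective: idiomatic
-- what changed: Replaces the manual two-accumulator partition loop with a single stable sort keyed on the tag test (len(i.split('__')) > 1), so untagged items precede tagged ones with input order preserved in each group.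
import Mathlib
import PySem

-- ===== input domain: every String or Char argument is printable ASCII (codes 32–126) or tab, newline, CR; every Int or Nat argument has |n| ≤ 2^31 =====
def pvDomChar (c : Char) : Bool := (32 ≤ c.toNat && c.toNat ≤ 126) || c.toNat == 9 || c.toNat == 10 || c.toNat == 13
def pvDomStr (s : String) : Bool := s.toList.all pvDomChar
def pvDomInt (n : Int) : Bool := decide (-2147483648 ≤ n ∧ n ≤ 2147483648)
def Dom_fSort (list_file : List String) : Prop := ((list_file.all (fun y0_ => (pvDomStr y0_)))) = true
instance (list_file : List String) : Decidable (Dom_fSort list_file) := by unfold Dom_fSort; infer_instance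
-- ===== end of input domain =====

-- B replaces A's two-accumulator partition loop with one stable sort keyed on the tag test (idiomatic; same return value).

-- i.split('__'): sep nonempty, so split? always returns some
def pySplit (i : String) : List String := (PySem.Str.split? i "__").getD []

-- ===== PORT A =====
def fSort (list_file : List String) : List String :=
  let st := list_file.foldl
    (fun (st : List String × List String) i =>
      if (pySplit i).length == 1 then (st.1 ++ [i], st.2) else (st.1, st.2 ++ [i]))
    ([], [])
  st.1 ++ st.2

-- ===== PORT B =====
-- key=lambda i: len(i.split('__')) > 1  (Python bool sorts as 0/1)
def fSortKey (i : String) : Nat := if (pySplit i).length > 1 then 1 else 0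

def fSort_alt (list_file : List String) : List String :=
  PySem.List.sorted list_file fSortKey false

-- ===== PRECONDITION & SPEC =====
def Spec_fSort (list_file : List String) (out : List String) : Prop := out = fSort_alt list_file
instance (list_file : List String) (out : List String) : Decidable (Spec_fSort list_file out) := by unfold Spec_fSort; infer_instance

-- ===== CLAIM (what is proved, stated in full; the proofs are below) =====
def Claim_equal_fSort : Prop := ∀ (list_file : List String), Dom_fSort list_file → Spec_fSort list_file (fSort list_file)

-- ===== LEMMAS AND PROOFS =====

theorem splitOn_go_ne_nil (sep : List Char) (fuel : Nat) (l cur : List Char)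
    (acc : List (List Char)) : PySem.Chars.splitOn.go sep fuel l cur acc ≠ [] := by
  induction fuel generalizing l cur acc with
  | zero => simp [PySem.Chars.splitOn.go]
  | succ fuel ih =>
    cases l with
    | nil => simp [PySem.Chars.splitOn.go]
    | cons c rest =>
      rw [PySem.Chars.splitOn.go]
      split_ifs <;> exact ih _ _ _

theorem pySplit_ne_nil (i : String) : pySplit i ≠ [] := by
  simp only [pySplit, PySem.Str.split?, PySem.Chars.split?, PySem.Chars.splitOn]
  simp only [List.isEmpty_iff]
  norm_num
  intro h
  exact splitOn_go_ne_nil _ _ _ _ _ (List.map_eq_nil_iff.mp h)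

theorem key_cases (i : String) : ((pySplit i).length == 1) = (fSortKey i == 0) := by
  have h := pySplit_ne_nil i
  have h1 : 1 ≤ (pySplit i).length := List.length_pos_iff.mpr h
  simp only [fSortKey]
  split_ifs with hgt <;> simp <;> omega

theorem key_zero_or_one (x : String) : fSortKey x = 0 ∨ fSortKey x = 1 := by
  simp only [fSortKey]; split_ifs <;> simp

theorem insertBy_key_zero (x : String) (h0 : fSortKey x = 0) (A0 A1 : List String)
    (hA0 : ∀ a ∈ A0, fSortKey a = 0) (hA1 : ∀ a ∈ A1, fSortKey a = 1) :
    PySem.List.insertBy (fun a b => decide (fSortKey a < fSortKey b)) x (A0 ++ A1)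
      = A0 ++ x :: A1 := by
  induction A0 with
  | nil =>
    cases A1 with
    | nil => simp [PySem.List.insertBy]
    | cons y ys =>
      have hy := hA1 y (by simp)
      simp [PySem.List.insertBy, h0, hy]
  | cons a A0 ih =>
    have ha : fSortKey a = 0 := hA0 a (by simp)
    have hax : ¬ (fSortKey x < fSortKey a) := by simp [h0, ha]
    simp [PySem.List.insertBy, hax,
      ih (by intro b hb; exact hA0 b (by simp [hb]))]

theorem insertBy_key_one (x : String) (h1 : fSortKey x = 1) (l : List String) :
    PySem.List.insertBy (fun a b => decide (fSortKey a < fSortKey b)) x l = l ++ [x] := by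
  induction l with
  | nil => simp [PySem.List.insertBy]
  | cons a l ih =>
    have hax : ¬ (fSortKey x < fSortKey a) := by
      rcases key_zero_or_one a with h | h <;> simp [h1, h]
    simp [PySem.List.insertBy, hax, ih]

theorem sorted_foldl_invariant (xs A0 A1 : List String)
    (hA0 : ∀ a ∈ A0, fSortKey a = 0) (hA1 : ∀ a ∈ A1, fSortKey a = 1) :
    xs.foldl (fun acc x =>
        PySem.List.insertBy (fun a b => decide (fSortKey a < fSortKey b)) x acc) (A0 ++ A1)
      = (A0 ++ xs.filter (fun i => fSortKey i == 0))
        ++ (A1 ++ xs.filter (fun i => !(fSortKey i == 0))) := by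
  induction xs generalizing A0 A1 with
  | nil => simp
  | cons x xs ih =>
    rcases key_zero_or_one x with h | h
    · have hx0 : ∀ a ∈ A0 ++ [x], fSortKey a = 0 := by
        intro a ha
        rcases List.mem_append.mp ha with h' | h'
        · exact hA0 a h'
        · simp at h'; subst h'; exact h
      rw [List.foldl_cons, insertBy_key_zero x h A0 A1 hA0 hA1,
        show A0 ++ x :: A1 = (A0 ++ [x]) ++ A1 by simp,
        ih (A0 ++ [x]) A1 hx0 hA1]
      simp [h]
    · have hx1 : ∀ a ∈ A1 ++ [x], fSortKey a = 1 := by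
        intro a ha
        rcases List.mem_append.mp ha with h' | h'
        · exact hA1 a h'
        · simp at h'; subst h'; exact h
      rw [List.foldl_cons, insertBy_key_one x h (A0 ++ A1),
        show (A0 ++ A1) ++ [x] = A0 ++ (A1 ++ [x]) by simp,
        ih A0 (A1 ++ [x]) hA0 hx1]
      simp [h]

theorem fSort_alt_eq_filters (xs : List String) :
    fSort_alt xs = xs.filter (fun i => fSortKey i == 0)
        ++ xs.filter (fun i => !(fSortKey i == 0)) := by
  have := sorted_foldl_invariant xs [] [] (by simp) (by simp)
  simpa [fSort_alt, PySem.List.sorted] using this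

theorem fSort_foldl_invariant (xs : List String) (n o : List String) :
    xs.foldl (fun (st : List String × List String) i =>
        if (pySplit i).length == 1 then (st.1 ++ [i], st.2) else (st.1, st.2 ++ [i])) (n, o)
      = (n ++ xs.filter (fun i => (pySplit i).length == 1),
         o ++ xs.filter (fun i => !((pySplit i).length == 1))) := by
  induction xs generalizing n o with
  | nil => simp
  | cons x xs ih =>
    rw [List.foldl_cons]
    by_cases h : ((pySplit x).length == 1) = true
    · rw [if_pos h, ih]
      have h' : (pySplit x).length = 1 := by simpa using h
      simp [h']
    · rw [if_neg h, ih]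
      have h' : ¬ (pySplit x).length = 1 := by simpa using h
      simp [h']

-- ===== VERDICT (by name: the statement is the Claim_ definition above) =====
theorem fSort_spec : Claim_equal_fSort := by
  intro xs _
  show fSort xs = fSort_alt xs
  rw [fSort_alt_eq_filters]
  simp only [fSort, fSort_foldl_invariant]
  simp only [key_cases]
  simp
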